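-- pv_equiv track=rewrite | github.com/MrBrantCode/unitest_baseline | mut_generate/mist_train_taco/taco_9028/solution.py | can_reach_sorted_state
-- ===== SOURCE A (Python) =====
-- def can_reach_sorted_state(N, P):
--     # Add a dummy element at the beginning to make indexing easier
--     P = [0] + P
--
--     intervals = []
--     left = 0
--     right = -1
--
--     for i, p in enumerate(P):
--         if right < p:
--             right = p
--         if i == right:
--             intervals.append((left, right))
--             left = i + 1
--             right = -1
--
--     def check(L, R):
--         if L == R:
--             return True
--
--         to_left = []
--         fixed = []
--         to_right = []
--
--         for i, p in enumerate(P[L:R + 1], L):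
--             if i > p:
--                 to_left.append(p)
--             elif i == p:
--                 fixed.append(p)
--             else:
--                 to_right.append(p)
--
--         if fixed != list(range(L + 1, R + 1, 2)):
--             return False
--
--         if any(x > y for x, y in zip(to_left, to_left[1:])):
--             return False
--
--         if any(x > y for x, y in zip(to_right, to_right[1:])):
--             return False
--
--         return True
--
--     answer = 'Yes' if all(check(L, R) for L, R in intervals) else 'No'
--     return answer
-- ===== SOURCE B (Python) =====
-- # Single streaming pass over [0]+P: track block start/prefix-max and per-block
-- # accumulators (last to_left, last to_right, expected fixed value, ok flag)
-- # instead of building the intervals list and the three bucket lists.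
--
-- def _classify(i, p, pl, pr, expect, ok):
--     if i > p:
--         if pl is not None and pl > p:
--             ok = False
--         pl = p
--     elif i == p:
--         if p == expect:
--             expect += 2
--         else:
--             ok = False
--     else:
--         if pr is not None and pr > p:
--             ok = False
--         pr = p
--     return pl, pr, expect, ok
--
-- def can_reach_sorted_state(N, P):
--     left = 0
--     right = -1
--     pl = None
--     pr = None
--     expect = 1
--     ok = True
--     for i, p in enumerate([0] + P):
--         if right < p:
--             right = p
--         pl, pr, expect, ok = _classify(i, p, pl, pr, expect, ok)
--         if i == right:
--             if left != right and not (ok and expect > right):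
--                 return 'No'
--             left = i + 1
--             right = -1
--             pl = None
--             pr = None
--             expect = left + 1
--             ok = True
--     return 'Yes'
-- ===== Notes on version B (the rewrite author's own statement) =====
-- stated objective: alternative
-- what changed: Replaces A's two-phase design (build an intervals list by prefix-max, then re-slice each interval and bucket its elements into three lists compared afterwards) by one streaming pass over [0]+P that keeps only O(1) per-block accumulators (last to_left, last to_right, expected fixed value, ok flag) and finalizes each block on the fly.
import Mathlib
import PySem

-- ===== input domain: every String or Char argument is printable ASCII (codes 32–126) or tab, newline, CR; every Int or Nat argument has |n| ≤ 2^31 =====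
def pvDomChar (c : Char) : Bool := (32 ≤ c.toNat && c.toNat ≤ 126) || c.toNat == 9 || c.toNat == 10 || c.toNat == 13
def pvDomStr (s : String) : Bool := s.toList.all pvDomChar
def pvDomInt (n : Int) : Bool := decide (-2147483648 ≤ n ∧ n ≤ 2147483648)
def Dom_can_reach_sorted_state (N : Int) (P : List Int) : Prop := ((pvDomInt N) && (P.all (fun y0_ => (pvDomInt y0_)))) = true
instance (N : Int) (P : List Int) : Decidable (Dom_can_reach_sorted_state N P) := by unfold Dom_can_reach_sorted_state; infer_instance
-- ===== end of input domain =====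

-- B replaces A's two-phase structure (build the intervals list, then re-slice each block into
-- three bucket lists) by one streaming pass with O(1) per-block accumulators; same result.

-- ===== PORT A =====
-- intervals loop: state (left, right), emits (left, right) whenever i == right
def pvAIntervals (i left right : Int) : List Int → List (Int × Int)
  | [] => []
  | p :: rest =>
    let right := if right < p then p else right
    if i = right then (left, right) :: pvAIntervals (i + 1) (i + 1) (-1) rest
    else pvAIntervals (i + 1) left right rest

-- classification loop of check: buckets (to_left, fixed, to_right) over enumerate(P[L:R+1], L)
def pvAClassify : Int → List Int → List Int × List Int × List Int
  | _, [] => ([], [], [])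
  | j, p :: rest =>
    let r := pvAClassify (j + 1) rest
    if j > p then (p :: r.1, r.2.1, r.2.2)
    else if j = p then (r.1, p :: r.2.1, r.2.2)
    else (r.1, r.2.1, p :: r.2.2)

-- any(x > y for x, y in zip(l, l[1:]))  (l[1:] is l.tail, PySem.List.slice_from_one)
def pvAAnyDesc (l : List Int) : Bool := (l.zip l.tail).any (fun q => decide (q.1 > q.2))

def pvACheck (P0 : List Int) (L R : Int) : Bool :=
  if L = R then true
  else
    let seg := PySem.List.slice P0 (some L) (some (R + 1))
    let c := pvAClassify L seg
    if c.2.1 ≠ PySem.List.pyRange (L + 1) (R + 1) 2 then false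
    else if pvAAnyDesc c.1 then false
    else if pvAAnyDesc c.2.2 then false
    else true

def can_reach_sorted_state (N : Int) (P : List Int) : String :=
  let P0 := 0 :: P
  if (pvAIntervals 0 0 (-1) P0).all (fun LR => pvACheck P0 LR.1 LR.2) then "Yes" else "No"

-- ===== PORT B =====
-- _classify helper of Source B: updates (prev_left, prev_right, expect, ok) for element p at index i
def pvClassify (i p : Int) (pl pr : Option Int) (expect : Int) (ok : Bool) :
    Option Int × Option Int × Int × Bool :=
  if i > p then
    (some p, pr, expect, if (match pl with | some q => decide (q > p) | none => false) then false else ok)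
  else if i = p then
    (if p = expect then (pl, pr, expect + 2, ok) else (pl, pr, expect, false))
  else
    (pl, some p, expect, if (match pr with | some q => decide (q > p) | none => false) then false else ok)

-- the single for-loop of Source B over enumerate([0] + P)
def pvBLoop (i left right : Int) (pl pr : Option Int) (expect : Int) (ok : Bool) :
    List Int → String
  | [] => "Yes"
  | p :: rest =>
    let right := if right < p then p else right
    let s := pvClassify i p pl pr expect ok
    if i = right then
      (if decide (left ≠ right) && !(s.2.2.2 && decide (s.2.2.1 > right)) then "No"
       else pvBLoop (i + 1) (i + 1) (-1) none none (i + 2) true rest)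
    else pvBLoop (i + 1) left right s.1 s.2.1 s.2.2.1 s.2.2.2 rest

def can_reach_sorted_state_alt (N : Int) (P : List Int) : String :=
  pvBLoop 0 0 (-1) none none 1 true (0 :: P)

-- ===== PRECONDITION & SPEC =====
def Spec_can_reach_sorted_state (N : Int) (P : List Int) (out : String) : Prop := out = can_reach_sorted_state_alt N P
instance (N : Int) (P : List Int) (out : String) : Decidable (Spec_can_reach_sorted_state N P out) := by unfold Spec_can_reach_sorted_state; infer_instance

-- ===== CLAIM (what is proved, stated in full; the proofs are below) =====
def Claim_equal_can_reach_sorted_state : Prop := ∀ (N : Int) (P : List Int), Dom_can_reach_sorted_state N P → Spec_can_reach_sorted_state N P (can_reach_sorted_state N P)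

-- ===== LEMMAS AND PROOFS =====

-- streaming state of B restricted to the per-block accumulators
def pvSFold (j : Int) (s : Option Int × Option Int × Int × Bool) : List Int → Option Int × Option Int × Int × Bool
  | [] => s
  | p :: rest => pvSFold (j + 1) (pvClassify j p s.1 s.2.1 s.2.2.1 s.2.2.2) rest

def pvFoldMax (l : List Int) : Int := l.foldl (fun r p => if r < p then p else r) (-1)

def pvLastD (l : List Int) (d : Option Int) : Option Int :=
  match l.getLast? with | some x => some x | none => d

def pvChain : Option Int → List Int → Bool
  | _, [] => true
  | none, x :: xs => pvChain (some x) xs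
  | some q, x :: xs => !(decide (q > x)) && pvChain (some x) xs

def pvFixRun : Int → List Int → Int × Bool
  | e, [] => (e, true)
  | e, x :: xs => if x = e then pvFixRun (e + 2) xs else ((pvFixRun e xs).1, false)

theorem pvSFold_append (l1 l2 : List Int) : ∀ (j : Int) (s : Option Int × Option Int × Int × Bool),
    pvSFold j s (l1 ++ l2) = pvSFold (j + l1.length) (pvSFold j s l1) l2 := by
  induction l1 with
  | nil => simp [pvSFold]
  | cons x xs ih =>
    intro j s
    simp only [List.cons_append, pvSFold, ih, List.length_cons]
    congr 1
    push_cast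
    ring

theorem pvFoldMax_append (l : List Int) (p : Int) :
    pvFoldMax (l ++ [p]) = (if pvFoldMax l < p then p else pvFoldMax l) := by
  simp [pvFoldMax, List.foldl_append]

theorem pvChain_some (l : List Int) : ∀ q : Int, pvChain (some q) l = !pvAAnyDesc (q :: l) := by
  induction l with
  | nil => intro q; simp [pvChain, pvAAnyDesc]
  | cons x xs ih =>
    intro q
    simp [pvChain, ih, pvAAnyDesc, Bool.not_or]

theorem pvChain_none (l : List Int) : pvChain none l = !pvAAnyDesc l := by
  cases l with
  | nil => simp [pvChain, pvAAnyDesc]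
  | cons x xs => simp [pvChain, pvChain_some, pvAAnyDesc]

theorem pvClassify_fix_bounds (seg : List Int) : ∀ (j : Int), ∀ x ∈ (pvAClassify j seg).2.1,
    j ≤ x ∧ x < j + seg.length := by
  induction seg with
  | nil => intro j x hx; simp [pvAClassify] at hx
  | cons p rest ih =>
    intro j x hx
    simp only [pvAClassify] at hx
    split_ifs at hx with h1 h2
    · have := ih (j + 1) x hx
      simp only [List.length_cons]
      push_cast
      omega
    · rcases List.mem_cons.mp hx with h | h
      · subst h; simp only [List.length_cons]; push_cast; omega
      · have := ih (j + 1) x h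
        simp only [List.length_cons]; push_cast; omega
    · have := ih (j + 1) x hx
      simp only [List.length_cons]; push_cast; omega

theorem pvLastD_cons (x : Int) (l : List Int) (d : Option Int) :
    pvLastD (x :: l) d = pvLastD l (some x) := by
  cases l with
  | nil => simp [pvLastD]
  | cons y ys =>
    simp only [pvLastD, List.getLast?_cons_cons]
    cases h : (y :: ys).getLast? with
    | some z => rfl
    | none => simp at h

theorem pvSFold_spec (seg : List Int) : ∀ (j : Int) (pl pr : Option Int) (e : Int) (ok : Bool),
    pvSFold j (pl, pr, e, ok) seg =
      (pvLastD (pvAClassify j seg).1 pl,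
       pvLastD (pvAClassify j seg).2.2 pr,
       (pvFixRun e (pvAClassify j seg).2.1).1,
       ((ok && pvChain pl (pvAClassify j seg).1) && pvChain pr (pvAClassify j seg).2.2)
          && (pvFixRun e (pvAClassify j seg).2.1).2) := by
  induction seg with
  | nil => intro j pl pr e ok; simp [pvSFold, pvAClassify, pvLastD, pvChain, pvFixRun]
  | cons p rest ih =>
    intro j pl pr e ok
    simp only [pvSFold, pvClassify, pvAClassify]
    by_cases h1 : j > p
    · rw [if_pos h1, if_pos h1, ih]
      cases pl with
      | none => simp [pvChain, pvLastD_cons]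
      | some q =>
        by_cases hq : q > p
        · simp [pvChain, pvLastD_cons, hq]
        · simp [pvChain, pvLastD_cons, hq]
    · rw [if_neg h1, if_neg h1]
      by_cases h2 : j = p
      · rw [if_pos h2, if_pos h2]
        by_cases he : p = e
        · rw [if_pos he, ih]
          simp [pvFixRun, he]
        · rw [if_neg he, ih]
          simp [pvFixRun, he]
      · rw [if_neg h2, if_neg h2, ih]
        cases pr with
        | none => simp [pvChain, pvLastD_cons]
        | some q =>
          by_cases hq : q > p
          · simp [pvChain, pvLastD_cons, hq]
          · simp [pvChain, pvLastD_cons, hq]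

theorem pvRange2_nil (e b : Int) (h : b ≤ e) : PySem.List.pyRange e b 2 = [] := by
  rw [PySem.List.pyRange_of_pos _ _ (by norm_num : (0:Int) < 2)]
  simp [if_neg (not_lt.mpr h)]

theorem pvRange2_cons (e b : Int) (h : e < b) :
    PySem.List.pyRange e b 2 = e :: PySem.List.pyRange (e + 2) b 2 := by
  rw [PySem.List.pyRange_of_pos _ _ (by norm_num : (0:Int) < 2),
      PySem.List.pyRange_of_pos _ _ (by norm_num : (0:Int) < 2)]
  rw [if_pos h]
  by_cases h2 : e + 2 < b
  · rw [if_pos h2]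
    have hc : ((b - e + 2 - 1) / 2).toNat = ((b - (e + 2) + 2 - 1) / 2).toNat + 1 := by omega
    rw [hc, List.range_succ_eq_map, List.map_cons, List.map_map]
    congr 1
    · simp
    · congr 1
      funext k
      simp only [Function.comp]
      push_cast
      ring
  · rw [if_neg h2]
    have hc : ((b - e + 2 - 1) / 2).toNat = 1 := by omega
    rw [hc]
    simp

theorem pvFixRun_iff (fx : List Int) : ∀ (e R : Int), (∀ x ∈ fx, x ≤ R) →
    (((pvFixRun e fx).2 && decide ((pvFixRun e fx).1 > R)) = true ↔
      fx = PySem.List.pyRange (e) (R + 1) 2) := by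
  induction fx with
  | nil =>
    intro e R _
    rcases lt_or_ge R e with h' | h'
    · simp [pvFixRun, pvRange2_nil e (R + 1) (by omega), h']
    · rw [pvRange2_cons e (R + 1) (by omega)]
      simp [pvFixRun]
      omega
  | cons x xs ih =>
    intro e R h
    have hx : x ≤ R := h x (by simp)
    by_cases hxe : x = e
    · subst hxe
      have hstep : pvFixRun x (x :: xs) = pvFixRun (x + 2) xs := by simp [pvFixRun]
      rw [hstep, pvRange2_cons x (R + 1) (by omega)]
      rw [ih (x + 2) R (fun y hy => h y (by simp [hy]))]
      simp
    · have hstep : pvFixRun e (x :: xs) = ((pvFixRun e xs).1, false) := by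
        simp [pvFixRun, hxe]
      rw [hstep]
      rcases lt_or_ge R e with h' | h'
      · simp [pvRange2_nil e (R + 1) (by omega)]
      · rw [pvRange2_cons e (R + 1) (by omega)]
        simp [hxe]

-- per finished block: A's bucket check equals B's streaming condition
theorem pvBlockEq (seg : List Int) (L : Int) :
    (let c := pvAClassify L seg
     if c.2.1 ≠ PySem.List.pyRange (L + 1) (L + (seg.length : Int)) 2 then false
     else if pvAAnyDesc c.1 then false
     else if pvAAnyDesc c.2.2 then false
     else true)
    = ((pvSFold L (none, none, L + 1, true) seg).2.2.2
        && decide ((pvSFold L (none, none, L + 1, true) seg).2.2.1 > L + (seg.length : Int) - 1)) := by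
  have hb : ∀ x ∈ (pvAClassify L seg).2.1, x ≤ L + (seg.length : Int) - 1 := by
    intro x hx
    have := pvClassify_fix_bounds seg L x hx
    omega
  have hiff := pvFixRun_iff (pvAClassify L seg).2.1 (L + 1) (L + (seg.length : Int) - 1) hb
  have hR1 : L + (seg.length : Int) - 1 + 1 = L + (seg.length : Int) := by ring
  rw [hR1] at hiff
  rw [pvSFold_spec]
  dsimp only
  simp only [pvChain_none, Bool.true_and]
  by_cases heq : (pvAClassify L seg).2.1 = PySem.List.pyRange (L + 1) (L + (seg.length : Int)) 2
  · rw [if_neg (not_not_intro heq)]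
    have h2 := hiff.mpr heq
    simp only [Bool.and_eq_true] at h2
    obtain ⟨hf2, hdec⟩ := h2
    rw [hf2, hdec]
    simp only [Bool.and_true]
    cases ha : pvAAnyDesc (pvAClassify L seg).1
    · cases hbb : pvAAnyDesc (pvAClassify L seg).2.2
      · simp
      · simp
    · simp
  · rw [if_pos heq]
    have h3 : ((pvFixRun (L + 1) (pvAClassify L seg).2.1).2
        && decide ((pvFixRun (L + 1) (pvAClassify L seg).2.1).1 > L + (seg.length : Int) - 1)) = false := by
      cases hc : ((pvFixRun (L + 1) (pvAClassify L seg).2.1).2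
          && decide ((pvFixRun (L + 1) (pvAClassify L seg).2.1).1 > L + (seg.length : Int) - 1))
      · rfl
      · exact absurd (hiff.mp hc) heq
    rcases Bool.and_eq_false_iff.mp h3 with hc | hc <;> rw [hc] <;> simp

-- the joint induction: B's loop vs A's intervals-then-check, generalized over the processed prefix
theorem pvJoint (rest : List Int) : ∀ (pre mid : List Int),
    pvBLoop ((pre.length : Int) + mid.length) pre.length (pvFoldMax mid)
      (pvSFold pre.length (none, none, (pre.length : Int) + 1, true) mid).1
      (pvSFold pre.length (none, none, (pre.length : Int) + 1, true) mid).2.1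
      (pvSFold pre.length (none, none, (pre.length : Int) + 1, true) mid).2.2.1
      (pvSFold pre.length (none, none, (pre.length : Int) + 1, true) mid).2.2.2 rest
    = (if (pvAIntervals ((pre.length : Int) + mid.length) pre.length (pvFoldMax mid) rest).all
          (fun LR => pvACheck (pre ++ mid ++ rest) LR.1 LR.2) then "Yes" else "No") := by
  induction rest with
  | nil =>
    intro pre mid
    simp [pvBLoop, pvAIntervals]
  | cons p rest' ih =>
    intro pre mid
    have hstep : pvSFold (pre.length : Int) (none, none, (pre.length : Int) + 1, true) (mid ++ [p])
        = pvClassify ((pre.length : Int) + (mid.length : Int)) p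
            (pvSFold (pre.length : Int) (none, none, (pre.length : Int) + 1, true) mid).1
            (pvSFold (pre.length : Int) (none, none, (pre.length : Int) + 1, true) mid).2.1
            (pvSFold (pre.length : Int) (none, none, (pre.length : Int) + 1, true) mid).2.2.1
            (pvSFold (pre.length : Int) (none, none, (pre.length : Int) + 1, true) mid).2.2.2 := by
      rw [pvSFold_append]
      simp [pvSFold]
    have fresh : ∀ pre'' : List Int, pre'' ++ rest' = pre ++ mid ++ p :: rest' →
        pvBLoop (↑pre''.length) (↑pre''.length) (-1) none none ((↑pre''.length : Int) + 1) true rest'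
        = (if (pvAIntervals (↑pre''.length) (↑pre''.length) (-1) rest').all
              (fun LR => pvACheck (pre ++ mid ++ p :: rest') LR.1 LR.2) then "Yes" else "No") := by
      intro pre'' hcat
      have H := ih pre'' []
      simp only [List.length_nil, Nat.cast_zero, add_zero, List.append_nil, pvFoldMax,
        List.foldl_nil, pvSFold] at H
      rw [hcat] at H
      exact H
    simp only [pvBLoop, pvAIntervals]
    by_cases hfin : ((pre.length : Int) + (mid.length : Int)) = (if pvFoldMax mid < p then p else pvFoldMax mid)
    · simp only [if_pos hfin]
      rw [← hfin]
      by_cases hmid : mid = []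
      · subst hmid
        simp only [List.length_nil, Nat.cast_zero, add_zero, List.append_nil]
        rw [show decide ((↑pre.length : Int) ≠ ↑pre.length) = false from by simp]
        simp only [Bool.false_and, Bool.false_eq_true, if_false, List.all_cons]
        have hch : pvACheck (pre ++ p :: rest') (↑pre.length) (↑pre.length) = true := by
          simp [pvACheck]
        simp only [hch, Bool.true_and]
        have F := fresh (pre ++ [p]) (by simp)
        simp only [List.append_nil] at F
        rw [show ((pre ++ [p]).length : Int) = (pre.length : Int) + 1 from by
          simp only [List.length_append, List.length_cons, List.length_nil]; push_cast; ring] at F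
        rw [show (pre.length : Int) + 1 + 1 = (pre.length : Int) + 2 from by ring] at F
        exact F
      · have hlpos : 0 < mid.length := List.length_pos_iff.mpr hmid
        have hne : (↑pre.length : Int) ≠ ↑pre.length + ↑mid.length := by omega
        rw [show decide ((↑pre.length : Int) ≠ ↑pre.length + ↑mid.length) = true from by simp [hne]]
        simp only [Bool.true_and, List.all_cons]
        have hslice : PySem.List.slice (pre ++ mid ++ p :: rest') (some (↑pre.length))
            (some ((↑pre.length : Int) + ↑mid.length + 1)) = mid ++ [p] := by
          rw [show ((↑pre.length : Int) + ↑mid.length + 1) = ((pre.length + (mid.length + 1) : Nat) : Int) from by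
            push_cast; ring]
          rw [PySem.List.slice_natCast]
          rw [show pre.length + (mid.length + 1) - pre.length = mid.length + 1 from by omega]
          rw [show pre ++ mid ++ p :: rest' = pre ++ (mid ++ p :: rest') from by simp]
          rw [List.drop_left]
          rw [show mid ++ p :: rest' = (mid ++ [p]) ++ rest' from by simp]
          rw [show mid.length + 1 = (mid ++ [p]).length from by simp]
          exact List.take_left
        have hch : pvACheck (pre ++ mid ++ p :: rest') (↑pre.length) ((↑pre.length : Int) + ↑mid.length)
            = ((pvSFold (pre.length : Int) (none, none, (pre.length : Int) + 1, true) (mid ++ [p])).2.2.2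
                && decide ((pvSFold (pre.length : Int) (none, none, (pre.length : Int) + 1, true) (mid ++ [p])).2.2.1
                      > (↑pre.length : Int) + ↑mid.length)) := by
          rw [pvACheck, if_neg hne]
          have hb := pvBlockEq (mid ++ [p]) (↑pre.length)
          rw [show ((↑pre.length : Int) + ↑((mid ++ [p]).length)) = (↑pre.length : Int) + ↑mid.length + 1 from by
            simp only [List.length_append, List.length_cons, List.length_nil]; push_cast; ring] at hb
          rw [show ((↑pre.length : Int) + ↑mid.length + 1 - 1) = (↑pre.length : Int) + ↑mid.length from by ring] at hb
          rw [hslice]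
          exact hb
        rw [hstep] at hch
        simp only [hch]
        cases hcv : ((pvClassify ((pre.length : Int) + (mid.length : Int)) p
            (pvSFold (pre.length : Int) (none, none, (pre.length : Int) + 1, true) mid).1
            (pvSFold (pre.length : Int) (none, none, (pre.length : Int) + 1, true) mid).2.1
            (pvSFold (pre.length : Int) (none, none, (pre.length : Int) + 1, true) mid).2.2.1
            (pvSFold (pre.length : Int) (none, none, (pre.length : Int) + 1, true) mid).2.2.2).2.2.2
              && decide ((pvClassify ((pre.length : Int) + (mid.length : Int)) p
            (pvSFold (pre.length : Int) (none, none, (pre.length : Int) + 1, true) mid).1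
            (pvSFold (pre.length : Int) (none, none, (pre.length : Int) + 1, true) mid).2.1
            (pvSFold (pre.length : Int) (none, none, (pre.length : Int) + 1, true) mid).2.2.1
            (pvSFold (pre.length : Int) (none, none, (pre.length : Int) + 1, true) mid).2.2.2).2.2.1
                  > (↑pre.length : Int) + ↑mid.length)) with
        | false => simp
        | true =>
          simp only [Bool.not_true, Bool.false_eq_true, if_false, Bool.true_and]
          have F := fresh (pre ++ mid ++ [p]) (by simp)
          rw [show ((pre ++ mid ++ [p]).length : Int) = (↑pre.length : Int) + ↑mid.length + 1 from by
            simp only [List.length_append, List.length_cons, List.length_nil]; push_cast; ring] at F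
          rw [show ((↑pre.length : Int) + ↑mid.length + 1 + 1) = (↑pre.length : Int) + ↑mid.length + 2 from by ring] at F
          exact F
    · simp only [if_neg hfin]
      rw [← hstep]
      have H := ih pre (mid ++ [p])
      rw [pvFoldMax_append mid p] at H
      rw [show ((pre.length : Int) + ↑((mid ++ [p]).length)) = (↑pre.length : Int) + ↑mid.length + 1 from by
        simp only [List.length_append, List.length_cons, List.length_nil]; push_cast; ring] at H
      rw [show pre ++ (mid ++ [p]) ++ rest' = pre ++ mid ++ p :: rest' from by simp] at H
      exact H

-- ===== VERDICT (by name: the statement is the Claim_ definition above) =====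
theorem can_reach_sorted_state_spec : Claim_equal_can_reach_sorted_state := by
  intro N P _
  show can_reach_sorted_state N P = can_reach_sorted_state_alt N P
  have h := pvJoint (0 :: P) [] []
  simpa [can_reach_sorted_state, can_reach_sorted_state_alt, pvSFold, pvFoldMax] using h.symm
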